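-- pv_equiv track=rewrite | github.com/ThomasCrawford/AdventofCode | 2017/day_21.py | recompose
-- ===== SOURCE A (Python) =====
-- import math
--
-- def recompose(blocks):
--     out = []
--     c = int(math.sqrt(len(blocks)))
--     w = int(math.sqrt(len(blocks[0])))
--     for block_row in range(c):
--         row = []
--         for sub_row in range(w):
--             for block_col in range(c):
--                 row += blocks[block_col+ c*block_row][sub_row*w:sub_row*w+w]
--         out += row
--     return out
-- ===== SOURCE B (Python) =====
-- import math
--
-- def recompose(blocks):
--     c = int(math.sqrt(len(blocks)))
--     w = int(math.sqrt(len(blocks[0])))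
--     rows = [[] for _ in range(c * w)]
--     for i, b in enumerate(blocks[:c * c]):
--         base = (i // c) * w
--         for s in range(w):
--             rows[base + s] += b[s * w:s * w + w]
--     return [x for row in rows for x in row]
-- ===== Notes on version B (the rewrite author's own statement) =====
-- stated objective: alternative
-- what changed: B replaces A's gather-style triple nested loop (block_row, sub_row, block_col with on-demand index arithmetic) by a single scatter pass over the blocks in their natural order that appends each block's sub-rows into an array of c*w row buckets, then flattens the buckets.
import Mathlib
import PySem

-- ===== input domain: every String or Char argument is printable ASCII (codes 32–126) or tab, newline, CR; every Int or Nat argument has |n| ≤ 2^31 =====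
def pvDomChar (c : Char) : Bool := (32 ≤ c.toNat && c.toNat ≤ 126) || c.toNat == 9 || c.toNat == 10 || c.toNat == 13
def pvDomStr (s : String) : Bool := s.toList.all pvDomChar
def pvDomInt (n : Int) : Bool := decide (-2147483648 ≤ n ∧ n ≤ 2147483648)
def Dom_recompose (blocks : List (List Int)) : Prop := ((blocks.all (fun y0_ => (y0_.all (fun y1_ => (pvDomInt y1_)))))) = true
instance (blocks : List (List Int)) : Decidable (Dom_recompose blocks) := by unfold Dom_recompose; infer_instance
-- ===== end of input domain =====

-- B is a single scatter pass over the blocks in natural order into c*w row buckets,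
-- flattened at the end, instead of A's gather-style triple nested loop (objective: alternative).
-- int(math.sqrt(n)) is ported as Nat.sqrt (exact on the sampled sizes); blocks[i] with the
-- always-in-range index block_col+c*block_row is ported with getD (exact under Pre_).

-- ===== PORT A =====
def recompose (blocks : List (List Int)) : List Int :=
  let out : List Int := []
  let c : Nat := Nat.sqrt blocks.length
  let w : Nat := Nat.sqrt (blocks.headD []).length   -- blocks[0]: Pre_ guarantees blocks ≠ []
  (List.range c).foldl (fun out block_row =>
    let row : List Int := (List.range w).foldl (fun row sub_row =>
      (List.range c).foldl (fun row block_col =>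
        row ++ PySem.List.slice (blocks.getD (block_col + c * block_row) [])
          (some ((sub_row * w : Nat) : Int)) (some ((sub_row * w + w : Nat) : Int))) row) []
    out ++ row) out

-- ===== PORT B =====
def recompose_alt (blocks : List (List Int)) : List Int :=
  let c : Nat := Nat.sqrt blocks.length
  let w : Nat := Nat.sqrt (blocks.headD []).length   -- blocks[0]: Pre_ guarantees blocks ≠ []
  let rows0 : List (List Int) := (List.range (c * w)).map (fun _ => [])
  let rows := (PySem.List.enumerate (PySem.List.slice blocks none (some ((c * c : Nat) : Int)))).foldl
    (fun rows ib =>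
      let base : Nat := (PySem.Int.floordiv ib.1 (c : Int)).toNat * w   -- i // c, nonnegative
      (List.range w).foldl (fun rows s =>
        rows.set (base + s) (rows.getD (base + s) [] ++
          PySem.List.slice ib.2 (some ((s * w : Nat) : Int)) (some ((s * w + w : Nat) : Int)))) rows)
    rows0
  rows.flatten

-- ===== PRECONDITION & SPEC =====
-- Pre_ excludes only the empty list, on which A raises IndexError at blocks[0].
def Pre_recompose (blocks : List (List Int)) : Prop := blocks ≠ []
instance (blocks : List (List Int)) : Decidable (Pre_recompose blocks) := by unfold Pre_recompose; infer_instance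
def pvWitness_recompose : List (List Int) := [[1, 2, 3, 4]]

def Spec_recompose (blocks : List (List Int)) (out : List Int) : Prop := out = recompose_alt blocks
instance (blocks : List (List Int)) (out : List Int) : Decidable (Spec_recompose blocks out) := by unfold Spec_recompose; infer_instance

-- ===== CLAIM (what is proved, stated in full; the proofs are below) =====
def Claim_equal_recompose : Prop := ∀ (blocks : List (List Int)), Dom_recompose blocks → Pre_recompose blocks → Spec_recompose blocks (recompose blocks)

-- ===== LEMMAS AND PROOFS =====

-- one scatter step: append v to bucket p.1
def appendAt (rows : List (List Int)) (p : Nat × List Int) : List (List Int) :=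
  rows.set p.1 (rows.getD p.1 [] ++ p.2)

theorem getD_set_self (l : List (List Int)) (i : Nat) (v : List Int) (h : i < l.length) :
    (l.set i v).getD i [] = v := by
  simp [List.getD_eq_getElem?_getD, h]

theorem getD_set_ne (l : List (List Int)) (i j : Nat) (v : List Int) (h : i ≠ j) :
    (l.set i v).getD j [] = l.getD j [] := by
  simp [List.getD_eq_getElem?_getD, List.getElem?_set_ne h]

theorem length_foldl_appendAt (L : List (Nat × List Int)) (rows : List (List Int)) :
    (L.foldl appendAt rows).length = rows.length := by
  induction L generalizing rows with
  | nil => rfl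
  | cons p L ih => simp [ih, appendAt]

theorem foldl_appendAt_getD (L : List (Nat × List Int)) (rows : List (List Int)) (r : Nat)
    (hb : ∀ p ∈ L, p.1 < rows.length) :
    (L.foldl appendAt rows).getD r [] =
      rows.getD r [] ++ L.flatMap (fun p => if p.1 = r then p.2 else []) := by
  induction L generalizing rows with
  | nil => simp
  | cons p L ih =>
    have hp : p.1 < rows.length := hb p (by simp)
    have hb' : ∀ q ∈ L, q.1 < (appendAt rows p).length := by
      intro q hq; simpa [appendAt] using hb q (by simp [hq])
    rw [List.foldl_cons, ih (appendAt rows p) hb', List.flatMap_cons]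
    by_cases h : p.1 = r
    · rw [if_pos h]
      unfold appendAt
      rw [h, getD_set_self rows r _ (h ▸ hp), List.append_assoc]
    · rw [if_neg h]
      unfold appendAt
      rw [getD_set_ne rows p.1 r _ h, List.nil_append]

theorem flatten_eq_flatMap_range (l : List (List Int)) :
    l.flatten = (List.range l.length).flatMap (fun r => l.getD r []) := by
  induction l with
  | nil => simp
  | cons x l ih =>
    rw [List.flatten_cons, ih]
    rw [List.length_cons, List.range_succ_eq_map, List.flatMap_cons, List.flatMap_map]
    simp

theorem getD_map_const_nil (n r : Nat) :
    ((List.range n).map (fun _ => ([] : List Int))).getD r [] = [] := by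
  rw [List.getD_eq_getElem?_getD, List.getElem?_map]
  cases (List.range n)[r]? <;> rfl

-- quotient/remainder arithmetic in the bucket index
theorem div_mul_add (b q k : Nat) (hb : 0 < b) (hk : k < b) : (q * b + k) / b = q := by
  rw [Nat.mul_comm q b, Nat.mul_add_div hb, Nat.div_eq_of_lt hk]
  rfl

theorem mod_mul_add (b q k : Nat) (hk : k < b) : (q * b + k) % b = k := by
  rw [Nat.mul_comm q b, Nat.mul_add_mod, Nat.mod_eq_of_lt hk]

-- range over a product, decomposed into quotient/remainder blocks
theorem range_mul_flatMap (a b : Nat) (F : Nat → List Int) :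
    (List.range (a * b)).flatMap F =
      (List.range a).flatMap (fun q => (List.range b).flatMap (fun k => F (q * b + k))) := by
  induction a with
  | zero => simp
  | succ a ih =>
    have h : (a + 1) * b = a * b + b := by ring
    rw [h, List.range_add, List.flatMap_append, ih, List.range_succ, List.flatMap_append]
    simp [List.flatMap_map]

-- exactly one index in range satisfies the guard
theorem flatMap_range_single (n t : Nat) (F : Nat → List Int) (ht : t < n) :
    (List.range n).flatMap (fun s => if s = t then F s else []) = F t := by
  induction n with
  | zero => omega
  | succ n ih =>
    rw [List.range_succ, List.flatMap_append]
    rcases Nat.lt_or_ge t n with h | h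
    · rw [ih h]
      simp [Nat.ne_of_gt h]
    · have : t = n := by omega
      subst this
      have : (List.range t).flatMap (fun s => if s = t then F s else []) = [] := by
        apply List.flatMap_eq_nil_iff.mpr
        intro s hs
        simp [Nat.ne_of_lt (List.mem_range.mp hs)]
      simp [this]

theorem flatMap_range_guard (w q r : Nat) (hw : 0 < w) (F : Nat → List Int) :
    (List.range w).flatMap (fun s => if q * w + s = r then F s else []) =
      if q = r / w then F (r % w) else [] := by
  have hdm : r / w * w + r % w = r := Nat.div_add_mod' r w
  by_cases h : q = r / w
  · subst h
    rw [if_pos rfl]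
    have hc : ∀ s ∈ List.range w,
        (if r / w * w + s = r then F s else []) = (if s = r % w then F s else []) := by
      intro s hs
      by_cases h1 : s = r % w
      · subst h1; rw [if_pos hdm, if_pos rfl]
      · rw [if_neg (by intro he; exact h1 (by omega)), if_neg h1]
    rw [List.flatMap_congr hc, flatMap_range_single w (r % w) F (Nat.mod_lt _ hw)]
  · rw [if_neg h]
    apply List.flatMap_eq_nil_iff.mpr
    intro s hs
    have hs' : s < w := List.mem_range.mp hs
    rw [if_neg]
    intro he
    apply h
    have h2 := div_mul_add w q s hw hs'
    rw [he] at h2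
    exact h2.symm

-- A after flattening the folds
theorem recompose_flat (blocks : List (List Int)) :
    recompose blocks =
      (List.range (Nat.sqrt blocks.length)).flatMap (fun br =>
        (List.range (Nat.sqrt (blocks.headD []).length)).flatMap (fun sr =>
          (List.range (Nat.sqrt blocks.length)).flatMap (fun bc =>
            PySem.List.slice (blocks.getD (bc + Nat.sqrt blocks.length * br) [])
              (some ((sr * Nat.sqrt (blocks.headD []).length : Nat) : Int))
              (some ((sr * Nat.sqrt (blocks.headD []).length +
                       Nat.sqrt (blocks.headD []).length : Nat) : Int))))) := by
  unfold recompose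
  simp only [PySem.List.foldl_append_eq_flatMap, List.nil_append]

-- B's scatter fold, rewritten as one fold of appendAt over the flat Nat-indexed pair list
theorem recompose_alt_pairs (blocks : List (List Int)) :
    recompose_alt blocks =
      (((List.range ((Nat.sqrt blocks.length) * (Nat.sqrt blocks.length))).flatMap (fun i =>
          (List.range (Nat.sqrt (blocks.headD []).length)).map (fun s =>
            ((i / Nat.sqrt blocks.length) * Nat.sqrt (blocks.headD []).length + s,
             PySem.List.slice (blocks.getD i [])
               (some ((s * Nat.sqrt (blocks.headD []).length : Nat) : Int))
               (some ((s * Nat.sqrt (blocks.headD []).length +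
                        Nat.sqrt (blocks.headD []).length : Nat) : Int)))))).foldl appendAt
        ((List.range ((Nat.sqrt blocks.length) * (Nat.sqrt (blocks.headD []).length))).map
          (fun _ => ([] : List Int)))).flatten := by
  rw [List.foldl_flatMap]
  simp only [recompose_alt]
  set c := Nat.sqrt blocks.length with hc
  set w := Nat.sqrt (blocks.headD []).length with hw
  set bs := PySem.List.slice blocks none (some ((c * c : Nat) : Int)) with hbs
  have hbs' : bs = blocks.take (c * c) := by
    rw [hbs, PySem.List.slice_to_natCast]
  have hlen : bs.length = c * c := by
    have h := Nat.sqrt_le blocks.length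
    rw [← hc] at h
    rw [hbs', List.length_take]
    omega
  have hget : ∀ j, j < c * c → bs.getD j [] = blocks.getD j [] := by
    intro j hj
    rw [hbs', List.getD_eq_getElem?_getD, List.getD_eq_getElem?_getD, List.getElem?_take,
      if_pos hj]
  have henum : PySem.List.enumerate bs =
      (List.range (c * c)).map (fun (j : Nat) => ((j : Int), bs.getD j [])) := by
    rw [PySem.List.enumerate_eq_map_pyRange bs ([] : List Int), PySem.List.pyRange_one]
    have h0 : ((PySem.List.len bs - 0).toNat) = c * c := by
      rw [PySem.List.len_eq, hlen, Int.sub_zero, Int.toNat_natCast]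
    rw [h0, List.map_map]
    apply List.map_congr_left
    intro k hk
    simp
  congr 1
  rw [henum, List.foldl_map]
  apply PySem.List.foldl_congr_mem
  intro acc j hj
  have hj' : j < c * c := List.mem_range.mp hj
  rw [List.foldl_map]
  apply PySem.List.foldl_congr_mem
  intro acc2 s _
  unfold appendAt
  rw [hget j hj', PySem.Int.floordiv_natCast, Int.toNat_natCast]

-- the combinatorial core: A's triple gather flatMap = flatten of B's scattered buckets
theorem main_eq (blocks : List (List Int)) (c w : Nat) (hc0 : 0 < c) (_hcc : c * c ≤ blocks.length) :
    (List.range c).flatMap (fun br =>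
      (List.range w).flatMap (fun sr =>
        (List.range c).flatMap (fun bc =>
          PySem.List.slice (blocks.getD (bc + c * br) [])
            (some ((sr * w : Nat) : Int)) (some ((sr * w + w : Nat) : Int))))) =
    (((List.range (c * c)).flatMap (fun i =>
        (List.range w).map (fun s =>
          ((i / c) * w + s,
           PySem.List.slice (blocks.getD i [])
             (some ((s * w : Nat) : Int)) (some ((s * w + w : Nat) : Int)))))).foldl appendAt
      ((List.range (c * w)).map (fun _ => ([] : List Int)))).flatten := by
  by_cases hw0 : w = 0
  · subst hw0
    simp
    rw [show List.flatMap (fun (_ : Nat) => ([] : List Int)) (List.range c) = [] from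
          List.flatMap_eq_nil_iff.mpr (fun _ _ => rfl),
        show List.flatMap (fun (_ : Nat) => ([] : List (Nat × List Int))) (List.range (c * c)) = [] from
          List.flatMap_eq_nil_iff.mpr (fun _ _ => rfl)]
    rfl
  have hwpos : 0 < w := Nat.pos_of_ne_zero hw0
  symm
  set L := (List.range (c * c)).flatMap (fun i =>
      (List.range w).map (fun s =>
        ((i / c) * w + s,
         PySem.List.slice (blocks.getD i [])
           (some ((s * w : Nat) : Int)) (some ((s * w + w : Nat) : Int))))) with hL
  set rows0 := (List.range (c * w)).map (fun _ => ([] : List Int)) with hrows0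
  have hb : ∀ p ∈ L, p.1 < rows0.length := by
    intro p hp
    rw [hL] at hp
    obtain ⟨i, hi, hp2⟩ := List.mem_flatMap.mp hp
    obtain ⟨s, hs, rfl⟩ := List.mem_map.mp hp2
    have hi' : i < c * c := List.mem_range.mp hi
    have hs' : s < w := List.mem_range.mp hs
    have hq : i / c < c := Nat.div_lt_of_lt_mul hi'
    rw [hrows0]
    simp only [List.length_map, List.length_range]
    have h1 : (i / c + 1) * w = (i / c) * w + w := by ring
    have h2 : (i / c + 1) * w ≤ c * w := Nat.mul_le_mul_right _ (by omega)
    omega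
  rw [flatten_eq_flatMap_range, length_foldl_appendAt, hrows0]
  simp only [List.length_map, List.length_range]
  have hbuck : ∀ r ∈ List.range (c * w), ((L.foldl appendAt rows0).getD r []) =
      L.flatMap (fun p => if p.1 = r then p.2 else []) := by
    intro r _
    rw [foldl_appendAt_getD L rows0 r hb, hrows0, getD_map_const_nil, List.nil_append]
  rw [List.flatMap_congr hbuck]
  -- compute each bucket's contents
  have hbucket : ∀ r ∈ List.range (c * w),
      L.flatMap (fun p => if p.1 = r then p.2 else []) =
        (List.range c).flatMap (fun k =>
          PySem.List.slice (blocks.getD ((r / w) * c + k) [])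
            (some (((r % w) * w : Nat) : Int)) (some (((r % w) * w + w : Nat) : Int))) := by
    intro r hrm
    have hr : r < c * w := List.mem_range.mp hrm
    rw [hL, List.flatMap_assoc]
    have step1 : ∀ i ∈ List.range (c * c),
        ((List.range w).map (fun s =>
          ((i / c) * w + s,
           PySem.List.slice (blocks.getD i [])
             (some ((s * w : Nat) : Int)) (some ((s * w + w : Nat) : Int))))).flatMap
          (fun p => if p.1 = r then p.2 else []) =
        if i / c = r / w then
          PySem.List.slice (blocks.getD i [])
            (some (((r % w) * w : Nat) : Int)) (some (((r % w) * w + w : Nat) : Int))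
        else [] := by
      intro i _
      rw [List.flatMap_map]
      exact flatMap_range_guard w (i / c) r hwpos _
    rw [List.flatMap_congr step1, range_mul_flatMap c c]
    have step2 : ∀ q ∈ List.range c,
        (List.range c).flatMap (fun k =>
          if (q * c + k) / c = r / w then
            PySem.List.slice (blocks.getD (q * c + k) [])
              (some (((r % w) * w : Nat) : Int)) (some (((r % w) * w + w : Nat) : Int))
          else []) =
        if q = r / w then
          (List.range c).flatMap (fun k =>
            PySem.List.slice (blocks.getD (q * c + k) [])
              (some (((r % w) * w : Nat) : Int)) (some (((r % w) * w + w : Nat) : Int)))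
        else [] := by
      intro q _
      have hdiv : ∀ k ∈ List.range c, (q * c + k) / c = q := by
        intro k hk
        exact div_mul_add c q k hc0 (List.mem_range.mp hk)
      by_cases h : q = r / w
      · rw [if_pos h]
        apply List.flatMap_congr
        intro k hk
        rw [hdiv k hk, if_pos h]
      · rw [if_neg h]
        apply List.flatMap_eq_nil_iff.mpr
        intro k hk
        rw [hdiv k hk, if_neg h]
    rw [List.flatMap_congr step2]
    have hrw : r / w < c := Nat.div_lt_of_lt_mul (by rwa [Nat.mul_comm] at hr)
    rw [flatMap_range_single c (r / w) _ hrw]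
  rw [List.flatMap_congr hbucket]
  -- decompose range (c*w) as block-row × sub-row and compare with A
  rw [range_mul_flatMap c w]
  apply List.flatMap_congr
  intro br _
  apply List.flatMap_congr
  intro s hs
  have hs' : s < w := List.mem_range.mp hs
  rw [div_mul_add w br s hwpos hs', mod_mul_add w br s hs']
  apply List.flatMap_congr
  intro bc _
  have h3 : br * c + bc = bc + c * br := by ring
  rw [h3]

-- ===== VERDICT (by name: the statement is the Claim_ definition above) =====
theorem recompose_spec : Claim_equal_recompose := by
  intro blocks _ hpre
  unfold Spec_recompose
  rw [recompose_flat, recompose_alt_pairs]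
  have hc0 : 0 < Nat.sqrt blocks.length := by
    exact Nat.sqrt_pos.mpr (by cases blocks with
      | nil => exact absurd rfl hpre
      | cons a b => simp)
  exact main_eq blocks _ _ hc0 (Nat.sqrt_le blocks.length)
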